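-- pv_equiv track=rewrite | github.com/Sammisam8888/practical-labs | AIML-SEM5/28-10-25-01-k-medoid.py | update_medoids
-- ===== SOURCE A (Python) =====
-- def update_medoids(d, r, k, old_medoids):
--     new_medoids = []
--     for j in range(k):
--         cluster_points = [x for x, a in zip(d, r) if a == j]
--         if not cluster_points:
--             new_medoids.append(old_medoids[j])
--             continue
--         min_sum = float('inf')
--         medoid = old_medoids[j]
--         for candidate in cluster_points:
--             total_dist = sum(abs(candidate - x) for x in cluster_points)
--             if total_dist < min_sum:
--                 min_sum = total_dist
--                 medoid = candidate
--         new_medoids.append(medoid)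
--     return new_medoids
-- ===== SOURCE B (Python) =====
-- def _bisect_right(s, x):
--     lo, hi = 0, len(s)
--     while lo < hi:
--         mid = (lo + hi) // 2
--         if x < s[mid]:
--             hi = mid
--         else:
--             lo = mid + 1
--     return lo
--
--
-- def update_medoids(d, r, k, old_medoids):
--     clusters = {}
--     for a, x in zip(r, d):
--         clusters.setdefault(a, []).append(x)
--     new_medoids = []
--     for j in range(k):
--         pts = clusters.get(j)
--         if not pts:
--             new_medoids.append(old_medoids[j])
--             continue
--         s = sorted(pts)
--         m = len(s)
--         pref = [0]
--         for v in s: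
--             pref.append(pref[-1] + v)
--         total = pref[m]
--
--         def cost(c):
--             i = _bisect_right(s, c)
--             pi = pref[i]
--             return c * i - pi + (total - pi) - c * (m - i)
--
--         best = None
--         for c in pts:
--             t = cost(c)
--             if best is None or t < best[0]:
--                 best = (t, c)
--         new_medoids.append(best[1])
--     return new_medoids
-- ===== Notes on version B (the rewrite author's own statement) =====
-- stated objective: faster
-- what changed: Groups points per cluster with a single dict pass (instead of re-scanning zip(d,r) for every j) and replaces the O(n)-per-candidate distance scan by sort + prefix sums + binary search.
import Mathlib
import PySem

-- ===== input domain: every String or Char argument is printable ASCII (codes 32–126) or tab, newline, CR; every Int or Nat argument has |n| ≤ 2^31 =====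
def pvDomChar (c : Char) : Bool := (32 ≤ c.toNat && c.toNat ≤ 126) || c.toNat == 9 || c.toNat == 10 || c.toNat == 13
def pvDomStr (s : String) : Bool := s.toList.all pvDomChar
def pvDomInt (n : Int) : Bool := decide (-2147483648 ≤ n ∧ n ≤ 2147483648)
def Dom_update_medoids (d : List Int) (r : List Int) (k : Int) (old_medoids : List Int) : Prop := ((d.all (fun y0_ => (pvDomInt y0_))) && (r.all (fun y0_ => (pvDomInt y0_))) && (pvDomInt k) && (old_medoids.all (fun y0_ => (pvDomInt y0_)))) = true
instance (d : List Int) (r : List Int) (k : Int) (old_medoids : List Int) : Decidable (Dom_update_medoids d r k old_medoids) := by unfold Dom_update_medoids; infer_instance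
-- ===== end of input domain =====

-- B groups points per cluster in one dict pass and computes each candidate's total L1 distance via sort + prefix sums + binary search (objective: faster).

-- ===== PORT A =====
-- inner candidate loop of A: state = (min_sum, medoid); none plays float('inf')
def pyA_step (cluster_points : List Int) (st : Option Int × Int) (candidate : Int) : Option Int × Int :=
  let total_dist := (cluster_points.map (fun x => |candidate - x|)).sum
  match st.1 with
  | none => (some total_dist, candidate)
  | some min_sum => if total_dist < min_sum then (some total_dist, candidate) else st

def update_medoids (d : List Int) (r : List Int) (k : Int) (old_medoids : List Int) : List Int :=
  (PySem.List.pyRange 0 k 1).foldl (fun new_medoids j =>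
    let cluster_points := ((d.zip r).filter (fun p => p.2 == j)).map (·.1)
    if cluster_points.isEmpty then
      new_medoids ++ [PySem.List.pyGetD old_medoids j 0]  -- old_medoids[j]; in range under Pre_
    else
      new_medoids ++ [(cluster_points.foldl (pyA_step cluster_points)
          (none, PySem.List.pyGetD old_medoids j 0)).2]) []

-- ===== PORT B =====
-- Source B's hand-written _bisect_right is the standard bisect_right loop = PySem.List.bisectRight (same lo/hi loop)
def pyB_cost (s pref : List Int) (total : Int) (m : Nat) (c : Int) : Int :=
  let i : Int := (PySem.List.bisectRight s c : Int)
  let pi := PySem.List.pyGetD pref i 0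
  c * i - pi + (total - pi) - c * ((m : Int) - i)

-- inner candidate loop of B: best = None | (cost, medoid)
def pyB_step (cost : Int → Int) (st : Option (Int × Int)) (c : Int) : Option (Int × Int) :=
  let t := cost c
  match st with
  | none => some (t, c)
  | some p => if t < p.1 then some (t, c) else st

def update_medoids_alt (d : List Int) (r : List Int) (k : Int) (old_medoids : List Int) : List Int :=
  -- clusters = {}; for a, x in zip(r, d): clusters.setdefault(a, []).append(x)
  let clusters := (r.zip d).foldl (fun dd p => dd.modify p.1 [] (fun l => l ++ [p.2])) PySem.Dict.empty
  (PySem.List.pyRange 0 k 1).foldl (fun new_medoids j =>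
    let pts := PySem.Dict.getD clusters j []   -- clusters.get(j); `if not pts` covers None and []
    if pts.isEmpty then
      new_medoids ++ [PySem.List.pyGetD old_medoids j 0]  -- old_medoids[j]; in range under Pre_
    else
      let s := PySem.List.sorted pts (fun x => x) false
      let m := s.length
      let pref := s.foldl (fun p v => p ++ [PySem.List.pyGetD p (-1) 0 + v]) [0]
      let total := PySem.List.pyGetD pref (m : Int) 0
      let best := pts.foldl (pyB_step (pyB_cost s pref total m)) none
      new_medoids ++ [match best with
        | some p => p.2
        | none => 0]) []  -- none unreachable: pts is nonempty

-- ===== PRECONDITION & SPEC =====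
-- A evaluates old_medoids[j] for EVERY j in range(k), so it raises IndexError exactly when k > len(old_medoids).
def Pre_update_medoids (d : List Int) (r : List Int) (k : Int) (old_medoids : List Int) : Prop :=
  k ≤ (old_medoids.length : Int)
instance (d : List Int) (r : List Int) (k : Int) (old_medoids : List Int) : Decidable (Pre_update_medoids d r k old_medoids) := by unfold Pre_update_medoids; infer_instance

def pvWitness_update_medoids : List Int × List Int × Int × List Int := ([1, 2, -3, 2], [0, 1, 0, 1], 2, [0, 5])

def Spec_update_medoids (d : List Int) (r : List Int) (k : Int) (old_medoids : List Int) (out : List Int) : Prop := out = update_medoids_alt d r k old_medoids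
instance (d : List Int) (r : List Int) (k : Int) (old_medoids : List Int) (out : List Int) : Decidable (Spec_update_medoids d r k old_medoids out) := by unfold Spec_update_medoids; infer_instance

-- ===== CLAIM (what is proved, stated in full; the proofs are below) =====
def Claim_equal_update_medoids : Prop := ∀ (d : List Int) (r : List Int) (k : Int) (old_medoids : List Int), Dom_update_medoids d r k old_medoids → Pre_update_medoids d r k old_medoids → Spec_update_medoids d r k old_medoids (update_medoids d r k old_medoids)


-- ===== LEMMAS AND PROOFS =====

-- the grouped dict entry at j is A's per-j comprehension
theorem zip_swap_filter (j : Int) : ∀ (d r : List Int),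
    (((r.zip d).filter (fun p => p.1 == j)).map (·.2))
      = (((d.zip r).filter (fun p => p.2 == j)).map (·.1)) := by
  intro d
  induction d with
  | nil => intro r; cases r <;> simp
  | cons x d ih =>
    intro r
    cases r with
    | nil => simp
    | cons a r =>
      simp only [List.zip_cons_cons, List.filter_cons]
      by_cases h : a == j
      · simp only [h]; simp [ih r]
      · simp only [h]; simp [ih r]

-- plain-pair version of the candidate loop, common skeleton of both inner folds
def step2 (f : Int → Int) (p : Int × Int) (c : Int) : Int × Int :=
  let t := f c
  if t < p.1 then (t, c) else p

theorem sum_map_abs_of_le (c : Int) (l : List Int) (h : ∀ x ∈ l, x ≤ c) :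
    (l.map (fun x => |c - x|)).sum = c * l.length - l.sum := by
  induction l with
  | nil => simp
  | cons a t ih =>
    have ha : a ≤ c := h a (by simp)
    have := ih (fun x hx => h x (by simp [hx]))
    simp only [List.map_cons, List.sum_cons, List.length_cons, this]
    rw [abs_of_nonneg (by omega)]
    push_cast; ring

theorem sum_map_abs_of_gt (c : Int) (l : List Int) (h : ∀ x ∈ l, c < x) :
    (l.map (fun x => |c - x|)).sum = l.sum - c * l.length := by
  induction l with
  | nil => simp
  | cons a t ih =>
    have ha : c < a := h a (by simp)
    have := ih (fun x hx => h x (by simp [hx]))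
    simp only [List.map_cons, List.sum_cons, List.length_cons, this]
    rw [abs_of_nonpos (by omega)]
    push_cast; ring

-- running-sum list: prefList t l = [t+l₁, t+l₁+l₂, …]
def prefList (t : Int) : List Int → List Int
  | [] => []
  | v :: vs => (t + v) :: prefList (t + v) vs

theorem pref_fold_eq (l : List Int) : ∀ (acc : List Int) (h : acc ≠ []),
    l.foldl (fun p v => p ++ [PySem.List.pyGetD p (-1) 0 + v]) acc
      = acc ++ prefList (acc.getLast h) l := by
  induction l with
  | nil => intro acc h; simp [prefList]
  | cons v vs ih =>
    intro acc h
    have hlast : PySem.List.pyGetD acc (-1) 0 = acc.getLast h := PySem.List.pyGetD_neg_one acc 0 h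
    have hne : acc ++ [acc.getLast h + v] ≠ [] := by simp
    simp only [List.foldl_cons, hlast, ih _ hne]
    have hg : (acc ++ [acc.getLast h + v]).getLast hne = acc.getLast h + v := by
      rw [List.getLast_append_of_ne_nil hne (List.cons_ne_nil _ _)]; simp
    rw [hg]
    simp [prefList]

theorem prefList_getD (l : List Int) : ∀ (t : Int) (n : Nat), n ≤ l.length →
    (t :: prefList t l).getD n 0 = t + (l.take n).sum := by
  induction l with
  | nil =>
    intro t n hn
    have : n = 0 := by simpa using hn
    subst this; simp [prefList]
  | cons v vs ih =>
    intro t n hn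
    cases n with
    | zero => simp
    | succ n =>
      simp only [prefList, List.getD_cons_succ, List.take_succ_cons, List.sum_cons]
      rw [ih (t + v) n (by simpa using hn)]
      ring

theorem foldlA_some (cl : List Int) :
    ∀ (l : List Int) (mn med : Int),
      l.foldl (pyA_step cl) (some mn, med) =
        ((some (l.foldl (step2 (fun c => (cl.map (fun x => |c - x|)).sum)) (mn, med)).1,
          (l.foldl (step2 (fun c => (cl.map (fun x => |c - x|)).sum)) (mn, med)).2) : Option Int × Int) := by
  intro l
  induction l with
  | nil => intro mn med; simp
  | cons c t ih =>
    intro mn med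
    simp only [List.foldl_cons, pyA_step, step2]
    split_ifs with hlt
    · exact ih _ _
    · exact ih _ _

theorem foldlB_some (g : Int → Int) :
    ∀ (l : List Int) (p : Int × Int),
      l.foldl (pyB_step g) (some p) = some (l.foldl (step2 g) p) := by
  intro l
  induction l with
  | nil => intro p; simp
  | cons c t ih =>
    intro p
    simp only [List.foldl_cons, pyB_step, step2]
    split_ifs with hlt
    · exact ih _
    · exact ih _

-- B's binary-search/prefix-sum cost equals A's summed L1 distance, for every candidate value
theorem cost_eq (pts : List Int) (c : Int) :
    pyB_cost (PySem.List.sorted pts (fun x => x) false)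
      ((PySem.List.sorted pts (fun x => x) false).foldl
        (fun p v => p ++ [PySem.List.pyGetD p (-1) 0 + v]) [0])
      (PySem.List.pyGetD ((PySem.List.sorted pts (fun x => x) false).foldl
        (fun p v => p ++ [PySem.List.pyGetD p (-1) 0 + v]) [0])
        ((PySem.List.sorted pts (fun x => x) false).length : Int) 0)
      (PySem.List.sorted pts (fun x => x) false).length c
    = (pts.map (fun x => |c - x|)).sum := by
  set s := PySem.List.sorted pts (fun x => x) false with hs
  set m := s.length with hm
  have hpw : s.Pairwise (· ≤ ·) := PySem.List.sorted_pairwise pts (fun x => x)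
  obtain ⟨hile, hle, hgt⟩ := PySem.List.bisectRight_spec s c hpw
  set i := PySem.List.bisectRight s c with hi
  -- the prefix-sum list is 0 :: running sums of s
  have hpref : s.foldl (fun p v => p ++ [PySem.List.pyGetD p (-1) 0 + v]) [0]
      = (0 : Int) :: prefList 0 s := by
    rw [pref_fold_eq s [0] (by simp)]; simp
  have hgetD : ∀ n : Nat, n ≤ m →
      PySem.List.pyGetD ((0 : Int) :: prefList 0 s) (n : Int) 0 = (s.take n).sum := by
    intro n hn
    rw [PySem.List.pyGetD_natCast]
    rw [prefList_getD s 0 n hn]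
    ring
  -- elements before the split point are ≤ c, after it are > c
  have htake : ∀ x ∈ s.take i, x ≤ c := by
    intro x hx
    obtain ⟨j, hj, rfl⟩ := List.getElem_of_mem hx
    have hj' : j < i := lt_of_lt_of_le hj (by simp [List.length_take])
    have hjm : j < m := lt_of_lt_of_le hj (by simp [List.length_take, hm])
    rw [List.getElem_take]
    exact hle j hjm hj'
  have hdrop : ∀ x ∈ s.drop i, c < x := by
    intro x hx
    obtain ⟨j, hj, rfl⟩ := List.getElem_of_mem hx
    have hj' : i + j < m := by simp [List.length_drop] at hj; omega
    rw [List.getElem_drop]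
    exact hgt (i + j) hj' (Nat.le_add_right _ _)
  -- the RHS summed over the sorted permutation, split at i
  have hperm : ((s.map (fun x => |c - x|)).sum) = (pts.map (fun x => |c - x|)).sum :=
    ((PySem.List.sorted_perm pts (fun x => x) false).map _).sum_eq
  have hsplit : (s.map (fun x => |c - x|)).sum
      = (((s.take i).map (fun x => |c - x|)).sum) + (((s.drop i).map (fun x => |c - x|)).sum) := by
    conv_lhs => rw [← List.take_append_drop i s]
    rw [List.map_append, List.sum_append]
  have hlen_take : (s.take i).length = i := by simp [List.length_take]; omega
  have hlen_drop : (s.drop i).length = m - i := by rw [List.length_drop, hm]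
  have hsum_split : (s.take i).sum + (s.drop i).sum = s.sum := by
    conv_rhs => rw [← List.take_append_drop i s]
    rw [List.sum_append]
  have h1 := sum_map_abs_of_le c (s.take i) htake
  have h2 := sum_map_abs_of_gt c (s.drop i) hdrop
  simp only [pyB_cost, hpref, ← hi]
  rw [hgetD i hile, hgetD m (le_refl m), List.take_length]
  rw [← hperm, hsplit, h1, h2, hlen_take, hlen_drop]
  have hcast : ((m - i : Nat) : Int) = (m : Int) - (i : Int) := by
    omega
  rw [hcast]
  have := hsum_split
  ring_nf
  omega

theorem medoid_eq (pts : List Int) (hne : ¬ pts.isEmpty) (init : Int) :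
    (pts.foldl (pyA_step pts) (none, init)).2 =
      (match pts.foldl (pyB_step (pyB_cost (PySem.List.sorted pts (fun x => x) false)
          ((PySem.List.sorted pts (fun x => x) false).foldl
            (fun p v => p ++ [PySem.List.pyGetD p (-1) 0 + v]) [0])
          (PySem.List.pyGetD ((PySem.List.sorted pts (fun x => x) false).foldl
            (fun p v => p ++ [PySem.List.pyGetD p (-1) 0 + v]) [0])
            ((PySem.List.sorted pts (fun x => x) false).length : Int) 0)
          (PySem.List.sorted pts (fun x => x) false).length)) none with
        | some p => p.2
        | none => 0) := by
  obtain ⟨c0, rest, rfl⟩ := List.exists_cons_of_ne_nil (by simpa [List.isEmpty_iff] using hne)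
  have hcost : pyB_cost (PySem.List.sorted (c0 :: rest) (fun x => x) false)
      ((PySem.List.sorted (c0 :: rest) (fun x => x) false).foldl
        (fun p v => p ++ [PySem.List.pyGetD p (-1) 0 + v]) [0])
      (PySem.List.pyGetD ((PySem.List.sorted (c0 :: rest) (fun x => x) false).foldl
        (fun p v => p ++ [PySem.List.pyGetD p (-1) 0 + v]) [0])
        ((PySem.List.sorted (c0 :: rest) (fun x => x) false).length : Int) 0)
      (PySem.List.sorted (c0 :: rest) (fun x => x) false).length
      = fun c => ((c0 :: rest).map (fun x => |c - x|)).sum :=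
    funext (cost_eq (c0 :: rest))
  rw [hcost]
  simp only [List.foldl_cons]
  have hA0 : pyA_step (c0 :: rest) (none, init) c0
      = (some (((c0 :: rest).map (fun x => |c0 - x|)).sum), c0) := rfl
  have hB0 : pyB_step (fun c => ((c0 :: rest).map (fun x => |c - x|)).sum) none c0
      = some ((((c0 :: rest).map (fun x => |c0 - x|)).sum), c0) := rfl
  rw [hA0, hB0, foldlA_some (c0 :: rest) rest _ _, foldlB_some _ rest _]

-- ===== VERDICT (by name: the statement is the Claim_ definition above) =====
theorem update_medoids_spec : Claim_equal_update_medoids := by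
  intro d r k om _ _
  unfold Spec_update_medoids update_medoids update_medoids_alt
  have hpts : ∀ j : Int,
      PySem.Dict.getD ((r.zip d).foldl (fun dd p => dd.modify p.1 [] (fun l => l ++ [p.2]))
        PySem.Dict.empty) j []
      = ((d.zip r).filter (fun p => p.2 == j)).map (·.1) := by
    intro j
    rw [PySem.Dict.getD_foldl_modify_append, PySem.Dict.getD_empty, List.nil_append]
    exact zip_swap_filter j d r
  simp only [hpts]
  congr 1
  funext acc j
  by_cases hE : (((d.zip r).filter (fun p => p.2 == j)).map (·.1)).isEmpty
  · simp only [hE, if_true]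
  · have hE' : (((d.zip r).filter (fun p => p.2 == j)).map (·.1)).isEmpty = false := by
      simpa using hE
    simp only [hE', Bool.false_eq_true, if_false]
    congr 1
    exact congrArg (fun z => [z]) (medoid_eq _ hE _)
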